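-- pv_equiv track=rewrite | github.com/allandeee/AI329_Ass3 | Allan_Dominguez_GA.py | play_ind
-- ===== SOURCE A (Python) =====
-- def play_ind(bits):
--     score = 0
--     # opp_sc = 0
--     for p1, p2 in zip(bits[0::2], bits[1::2]):
--         if p1 == '1':
--             if p2 == '1':
--                 score += 3
--                 # opp_sc += 3
--             else:
--                 score += 0
--                 # opp_sc += 5
--         else:
--             if p2 == '1':
--                 score += 5
--                 # opp_sc += 0
--             else:
--                 score += 1
--                 # opp_sc += 1
--     return score
-- ===== SOURCE B (Python) =====
-- def play_ind(bits):
--     # count-then-combine: payoff(a,b) = 1 - [a=='1'] + 4*[b=='1'] - [both=='1']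
--     pairs = list(zip(bits[0::2], bits[1::2]))
--     n = len(pairs)
--     cA = sum(1 for a, _ in pairs if a == '1')
--     cB = sum(1 for _, b in pairs if b == '1')
--     cAB = sum(1 for a, b in pairs if a == '1' and b == '1')
--     return n - cA + 4 * cB - cAB
-- ===== Notes on version B (the rewrite author's own statement) =====
-- stated objective: alternative
-- what changed: B replaces the per-pair nested if/else accumulation with three counting passes (pairs, cooperate-left, cooperate-right, both) combined by the closed-form score n - cA + 4*cB - cAB.
import Mathlib
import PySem

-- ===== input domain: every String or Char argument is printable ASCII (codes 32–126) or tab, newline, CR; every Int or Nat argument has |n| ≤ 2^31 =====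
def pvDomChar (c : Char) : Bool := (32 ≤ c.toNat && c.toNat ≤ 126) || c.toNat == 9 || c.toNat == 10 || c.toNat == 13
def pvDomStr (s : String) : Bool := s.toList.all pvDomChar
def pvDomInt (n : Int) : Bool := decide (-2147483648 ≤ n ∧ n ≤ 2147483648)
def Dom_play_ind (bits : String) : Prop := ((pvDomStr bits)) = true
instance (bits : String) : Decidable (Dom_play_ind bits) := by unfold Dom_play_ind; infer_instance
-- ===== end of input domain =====

-- ===== PORT A =====
-- literal port: zip of the two stride-2 slices, then a branching fold accumulating the score
-- (slice? with literal step 2 never returns none; .getD [] only discharges the Option)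
def play_ind (bits : String) : Int :=
  let p1 := (PySem.Chars.slice? bits.toList (some 0) none 2).getD []
  let p2 := (PySem.Chars.slice? bits.toList (some 1) none 2).getD []
  (p1.zip p2).foldl
    (fun score pr =>
      if pr.1 = '1' then
        if pr.2 = '1' then score + 3 else score + 0
      else
        if pr.2 = '1' then score + 5 else score + 1) 0

-- ===== PORT B =====
-- count-then-combine: n - cA + 4*cB - cAB over the same pair list
def play_ind_alt (bits : String) : Int :=
  let p1 := (PySem.Chars.slice? bits.toList (some 0) none 2).getD []
  let p2 := (PySem.Chars.slice? bits.toList (some 1) none 2).getD []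
  let pairs := p1.zip p2
  let n : Int := pairs.length
  let cA : Int := pairs.countP (fun p => p.1 == '1')
  let cB : Int := pairs.countP (fun p => p.2 == '1')
  let cAB : Int := pairs.countP (fun p => p.1 == '1' && p.2 == '1')
  n - cA + 4 * cB - cAB

-- ===== PRECONDITION & SPEC =====
def Spec_play_ind (bits : String) (out : Int) : Prop := out = play_ind_alt bits
instance (bits : String) (out : Int) : Decidable (Spec_play_ind bits out) := by unfold Spec_play_ind; infer_instance

-- ===== CLAIM (what is proved, stated in full; the proofs are below) =====
def Claim_equal_play_ind : Prop := ∀ (bits : String), Dom_play_ind bits → Spec_play_ind bits (play_ind bits)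

-- ===== LEMMAS AND PROOFS =====

-- the fold over any pair list equals the count formula (generalized over the accumulator)
theorem pv_fold_eq_counts (ps : List (Char × Char)) (acc : Int) :
    ps.foldl
      (fun score pr =>
        if pr.1 = '1' then
          if pr.2 = '1' then score + 3 else score + 0
        else
          if pr.2 = '1' then score + 5 else score + 1) acc
    = acc + (ps.length : Int)
        - (ps.countP (fun p => p.1 == '1') : Int)
        + 4 * (ps.countP (fun p => p.2 == '1') : Int)
        - (ps.countP (fun p => p.1 == '1' && p.2 == '1') : Int) := by
  induction ps generalizing acc with
  | nil => simp
  | cons pr t ih =>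
    rw [List.foldl_cons, ih]
    simp only [List.countP_cons, List.length_cons]
    by_cases h1 : pr.1 = '1' <;> by_cases h2 : pr.2 = '1' <;>
      simp only [h1, h2, if_pos, if_neg, beq_iff_eq, reduceIte, Bool.and_eq_true,
        decide_eq_true_eq, and_self, and_false, false_and] <;>
      · push_cast; ring

-- ===== VERDICT (by name: the statement is the Claim_ definition above) =====
theorem play_ind_spec : Claim_equal_play_ind := by
  intro bits _
  unfold Spec_play_ind play_ind play_ind_alt
  simp only [pv_fold_eq_counts]
  ring
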